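-- pv_equiv track=rewrite | github.com/acampkin95/csv-nlp | src/nlp/topic_modeling_analyzer.py | _analyze_speaker_preferences
-- ===== SOURCE A (Python) =====
-- from typing import List, Dict, Optional, Any, Set, Tuple
--
-- def _analyze_speaker_preferences(messages: List[Dict[str, Any]],
--                                 message_topics: Dict[int, str]) -> Dict[str, Dict[str, int]]:
--     """Analyze topic preferences by speaker."""
--     preferences = {}
--
--     for msg_idx, topic in message_topics.items():
--         sender = messages[msg_idx].get('sender', 'unknown')
--         if sender not in preferences:
--             preferences[sender] = {}
--         if topic not in preferences[sender]:
--             preferences[sender][topic] = 0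
--         preferences[sender][topic] += 1
--
--     return preferences
-- ===== SOURCE B (Python) =====
-- def _analyze_speaker_preferences(messages, message_topics):
--     """Analyze topic preferences by speaker (flat tally + reshape)."""
--     pairs = [(messages[i].get('sender', 'unknown'), t)
--              for i, t in message_topics.items()]
--     counts = {}
--     for p in pairs:
--         counts[p] = counts.get(p, 0) + 1
--     return {s: {t: counts[(s, t)]
--                 for t in dict.fromkeys(t2 for s2, t2 in pairs if s2 == s)}
--             for s in dict.fromkeys(s2 for s2, _ in pairs)}
-- ===== Notes on version B (the rewrite author's own statement) =====
-- stated objective: alternative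
-- what changed: Instead of A's single pass that grows a nested dict-of-dicts with membership tests and in-place increments, B first flattens to (sender, topic) pairs, tallies them in one flat counting dict, and then reshapes via ordered-dedup comprehensions into the nested result.
import Mathlib
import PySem

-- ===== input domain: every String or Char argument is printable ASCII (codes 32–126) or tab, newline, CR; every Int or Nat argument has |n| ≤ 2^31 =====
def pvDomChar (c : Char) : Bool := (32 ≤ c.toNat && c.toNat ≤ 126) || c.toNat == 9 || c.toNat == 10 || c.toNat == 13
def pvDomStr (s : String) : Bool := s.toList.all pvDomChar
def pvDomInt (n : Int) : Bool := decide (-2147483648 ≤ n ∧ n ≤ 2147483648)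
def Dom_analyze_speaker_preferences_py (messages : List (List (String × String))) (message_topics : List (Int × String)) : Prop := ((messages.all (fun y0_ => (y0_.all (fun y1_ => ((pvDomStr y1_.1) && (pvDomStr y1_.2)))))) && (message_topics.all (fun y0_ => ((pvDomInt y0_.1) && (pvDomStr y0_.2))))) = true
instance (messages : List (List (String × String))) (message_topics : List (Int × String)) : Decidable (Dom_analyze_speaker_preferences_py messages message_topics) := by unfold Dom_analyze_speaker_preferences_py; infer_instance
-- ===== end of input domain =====

-- B replaces A's one-pass nested dict-of-dicts accumulation by a flat (sender, topic) tally plus a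
-- dedup-comprehension reshape; same exact result (objective: alternative, no speed claim).

-- shared helper: messages[i].get('sender', 'unknown') — this exact expression occurs in both Pythons
def pvSender (messages : List (List (String × String))) (i : Int) : String :=
  (PySem.Dict.mk (PySem.List.pyGetD messages i [])).getD "sender" "unknown"

-- ===== PORT A =====
def analyze_speaker_preferences_py (messages : List (List (String × String))) (message_topics : List (Int × String)) : List (String × List (String × Int)) :=
  let preferences : PySem.Dict String (PySem.Dict String Int) :=
    message_topics.foldl (fun preferences p =>
      let sender := pvSender messages p.1
      let preferences := if preferences.contains sender then preferences else preferences.insert sender PySem.Dict.empty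
      let inner := preferences.getD sender PySem.Dict.empty
      let inner := if inner.contains p.2 then inner else inner.insert p.2 (0 : Int)
      let inner := inner.insert p.2 (inner.getD p.2 0 + 1)
      preferences.insert sender inner) PySem.Dict.empty
  preferences.items.map (fun kv => (kv.1, kv.2.items))

-- ===== PORT B =====
def analyze_speaker_preferences_py_alt (messages : List (List (String × String))) (message_topics : List (Int × String)) : List (String × List (String × Int)) :=
  let pairs : List (String × String) := message_topics.map (fun p => (pvSender messages p.1, p.2))
  let counts : PySem.Dict (String × String) Int :=
    pairs.foldl (fun d p => d.insert p (d.getD p 0 + 1)) PySem.Dict.empty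
  (PySem.List.dedup (pairs.map (·.1))).map (fun s =>
    (s, (PySem.List.dedup ((pairs.filter (fun q => q.1 == s)).map (·.2))).map (fun t =>
          (t, counts.getD (s, t) 0))))

-- ===== PRECONDITION & SPEC =====
-- Pre_: every message index appearing in message_topics is a valid Python index into messages
-- (otherwise A raises IndexError on messages[msg_idx]).
def Pre_analyze_speaker_preferences_py (messages : List (List (String × String))) (message_topics : List (Int × String)) : Prop :=
  ∀ p ∈ message_topics, PySem.Raise.InRange messages.length p.1
instance (messages : List (List (String × String))) (message_topics : List (Int × String)) : Decidable (Pre_analyze_speaker_preferences_py messages message_topics) := by unfold Pre_analyze_speaker_preferences_py; infer_instance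

def pvWitness_analyze_speaker_preferences_py : (List (List (String × String))) × (List (Int × String)) :=
  ([[("sender", "alice")], [("sender", "bob")]], [(0, "news"), (1, "news"), (-2, "sport")])

def Spec_analyze_speaker_preferences_py (messages : List (List (String × String))) (message_topics : List (Int × String)) (out : List (String × List (String × Int))) : Prop := out = analyze_speaker_preferences_py_alt messages message_topics
instance (messages : List (List (String × String))) (message_topics : List (Int × String)) (out : List (String × List (String × Int))) : Decidable (Spec_analyze_speaker_preferences_py messages message_topics out) := by unfold Spec_analyze_speaker_preferences_py; infer_instance

-- ===== CLAIM (what is proved, stated in full; the proofs are below) =====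
def Claim_equal_analyze_speaker_preferences_py : Prop := ∀ (messages : List (List (String × String))) (message_topics : List (Int × String)), Dom_analyze_speaker_preferences_py messages message_topics → Pre_analyze_speaker_preferences_py messages message_topics → Spec_analyze_speaker_preferences_py messages message_topics (analyze_speaker_preferences_py messages message_topics)

-- ===== LEMMAS AND PROOFS =====

-- A's loop body, condensed: reinsert sender s with the inner dict bumped at topic t.
def pvAStep (prefs : PySem.Dict String (PySem.Dict String Int)) (s t : String) : PySem.Dict String (PySem.Dict String Int) :=
  prefs.insert s ((prefs.getD s PySem.Dict.empty).insert t ((prefs.getD s PySem.Dict.empty).getD t 0 + 1))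

theorem pvAStep_eq (prefs : PySem.Dict String (PySem.Dict String Int)) (s t : String) :
    (let preferences := if prefs.contains s then prefs else prefs.insert s PySem.Dict.empty
     let inner := preferences.getD s PySem.Dict.empty
     let inner := if inner.contains t then inner else inner.insert t (0 : Int)
     let inner := inner.insert t (inner.getD t 0 + 1)
     preferences.insert s inner) = pvAStep prefs s t := by
  simp only [pvAStep]
  by_cases hc : prefs.contains s
  · simp only [hc, if_true]
    by_cases ht : (prefs.getD s PySem.Dict.empty).contains t
    · simp [ht]
    · simp [ht, PySem.Dict.getD_of_not_contains _ _ (eq_false_of_ne_true ht),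
        PySem.Dict.getD_insert_self, PySem.Dict.insert_insert_self]
  · simp [hc, PySem.Dict.getD_insert_self,
      PySem.Dict.getD_of_not_contains _ _ (eq_false_of_ne_true hc),
      PySem.Dict.insert_insert_self, PySem.Dict.contains_empty, PySem.Dict.getD_empty]

-- A's inner dict at sender s is the plain insert-count loop over s's topics, in order.
theorem pvInner_getD (l : List (String × String)) (N : PySem.Dict String (PySem.Dict String Int)) (s : String) :
    (l.foldl (fun N q => pvAStep N q.1 q.2) N).getD s PySem.Dict.empty
      = ((l.filter (fun q => q.1 == s)).map (·.2)).foldl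
          (fun d t => d.insert t (d.getD t 0 + 1)) (N.getD s PySem.Dict.empty) := by
  induction l generalizing N with
  | nil => rfl
  | cons q l ih =>
    simp only [List.foldl_cons, List.filter_cons]
    by_cases h : q.1 = s
    · simp only [h, beq_self_eq_true, if_true, List.map_cons, List.foldl_cons, ih]
      simp [pvAStep, PySem.Dict.getD_insert_self]
    · have hb : (q.1 == s) = false := beq_eq_false_iff_ne.mpr h
      simp only [hb, Bool.false_eq_true, if_false, ih]
      congr 1
      simp [pvAStep, PySem.Dict.getD_insert_of_ne _ _ _ (Ne.symm h)]

-- counting a topic among sender s's topics = counting the pair (s, t) among all pairs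
theorem pvCount_proj (l : List (String × String)) (s t : String) :
    ((l.filter (fun q => q.1 == s)).map (·.2)).count t = l.count (s, t) := by
  induction l with
  | nil => rfl
  | cons q l ih =>
    by_cases h1 : q.1 = s
    · by_cases h2 : q.2 = t
      · have : q = (s, t) := Prod.ext h1 h2
        simp [this, ih]
      · have : q ≠ (s, t) := by intro hq; exact h2 (by rw [hq])
        simp [h1, h2, this, ih]
    · have : q ≠ (s, t) := by intro hq; exact h1 (by rw [hq])
      simp [beq_eq_false_iff_ne.mpr h1, this, ih]

theorem pvMain (messages : List (List (String × String))) (mt : List (Int × String)) :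
    analyze_speaker_preferences_py messages mt = analyze_speaker_preferences_py_alt messages mt := by
  simp only [analyze_speaker_preferences_py, analyze_speaker_preferences_py_alt]
  set pairs : List (String × String) := mt.map (fun p => (pvSender messages p.1, p.2)) with hpairs
  have hstep : (fun (preferences : PySem.Dict String (PySem.Dict String Int)) (p : Int × String) =>
      let sender := pvSender messages p.1
      let preferences := if preferences.contains sender then preferences else preferences.insert sender PySem.Dict.empty
      let inner := preferences.getD sender PySem.Dict.empty
      let inner := if inner.contains p.2 then inner else inner.insert p.2 (0 : Int)
      let inner := inner.insert p.2 (inner.getD p.2 0 + 1)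
      preferences.insert sender inner)
      = fun N p => pvAStep N (pvSender messages p.1) p.2 := by
    funext N p; exact pvAStep_eq N (pvSender messages p.1) p.2
  rw [hstep]
  have hN : mt.foldl (fun N p => pvAStep N (pvSender messages p.1) p.2) PySem.Dict.empty
      = pairs.foldl (fun N q => pvAStep N q.1 q.2) PySem.Dict.empty := by
    rw [hpairs, List.foldl_map]
  rw [hN]
  set N := pairs.foldl (fun N q => pvAStep N q.1 q.2) PySem.Dict.empty with hNdef
  have hkeys : N.keys = PySem.Set.ofList (pairs.map (·.1)) := by
    rw [hNdef]
    simp only [pvAStep]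
    rw [PySem.Dict.keys_foldl_insert_key pairs (·.1)
      (fun d q => (d.getD q.1 PySem.Dict.empty).insert q.2 ((d.getD q.1 PySem.Dict.empty).getD q.2 0 + 1))
      PySem.Dict.empty]
    rw [PySem.Dict.keys_empty, PySem.Set.update_nil_left]
  have hnd : N.keys.Nodup := by
    rw [hNdef]
    simp only [pvAStep]
    exact PySem.Dict.nodup_keys_foldl_insert_key pairs (·.1) _ _ PySem.Dict.nodup_keys_empty
  have hinner : ∀ s : String, N.getD s PySem.Dict.empty
      = PySem.Dict.counter ((pairs.filter (fun q => q.1 == s)).map (·.2)) := by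
    intro s
    rw [hNdef, pvInner_getD, PySem.Dict.getD_empty,
      PySem.Dict.foldl_insert_getD_add_one_eq_counter]
  rw [PySem.Dict.items_eq_map_keys N hnd PySem.Dict.empty, List.map_map, hkeys,
    ← PySem.List.dedup_eq_ofList, PySem.Dict.foldl_insert_getD_add_one_eq_counter]
  refine List.map_congr_left ?_
  intro s hs
  simp only [Function.comp]
  refine Prod.ext rfl ?_
  rw [hinner s, PySem.Dict.items_counter, ← PySem.List.dedup_eq_ofList]
  refine List.map_congr_left ?_
  intro t ht
  rw [PySem.Dict.getD_counter, pvCount_proj]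

-- ===== VERDICT (by name: the statement is the Claim_ definition above) =====
theorem analyze_speaker_preferences_py_spec : Claim_equal_analyze_speaker_preferences_py := by
  intro messages message_topics _ _
  exact pvMain messages message_topics
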